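-- pv_equiv track=rewrite | github.com/wyk18703232953/myResearch | codeComplex/data/filteredData/python/quadratic/python_quadratic_0032.py | solve
-- ===== SOURCE A (Python) =====
-- MOD = 10**9 + 7
--
-- def solve(a):
--     dp = [1]
--     n = len(a)
--     for i in range(n):
--         if a[i] == 'f':
--             dp.append(0)
--             continue
--         for j in range(1, len(dp)):
--             dp[j] = (dp[j] + dp[j - 1]) % MOD
--     return dp[-1]
-- ===== SOURCE B (Python) =====
-- MOD = 10**9 + 7
--
-- def solve(a):
--     # Transposed DP: first record, for each 'f', how many non-'f' characters
--     # precede it; then fill the table layer by layer over f-indices, each layer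
--     # being one running prefix-sum over the non-'f' positions from that start.
--     starts = []
--     m = 0
--     for ch in a:
--         if ch == 'f':
--             starts.append(m)
--         else:
--             m += 1
--     cur = [1] * m
--     total = 1
--     for b in starts:
--         nxt = [0] * m
--         run = 0
--         for s in range(b, m):
--             run = (run + cur[s]) % MOD
--             nxt[s] = run
--         cur = nxt
--         total = run
--     return total
-- ===== Notes on version B (the rewrite author's own statement) =====
-- stated objective: alternative
-- what changed: B transposes the DP: a first pass records for each 'f' how many non-'f' characters precede it, then the table is filled layer by layer (one pass over the non-'f' positions per 'f', each a running prefix-sum starting at that 'f''s recorded offset), instead of A's single left-to-right sweep that updates a (k+1)-slot vector at every character.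
import Mathlib
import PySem

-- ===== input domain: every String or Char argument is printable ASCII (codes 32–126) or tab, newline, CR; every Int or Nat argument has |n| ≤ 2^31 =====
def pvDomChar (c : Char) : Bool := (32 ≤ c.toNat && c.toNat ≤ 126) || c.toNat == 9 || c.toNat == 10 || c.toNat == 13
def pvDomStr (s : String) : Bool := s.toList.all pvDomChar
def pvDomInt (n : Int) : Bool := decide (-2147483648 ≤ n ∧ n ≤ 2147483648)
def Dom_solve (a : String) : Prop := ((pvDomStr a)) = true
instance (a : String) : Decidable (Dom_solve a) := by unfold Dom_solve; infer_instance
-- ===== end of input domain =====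

-- B transposes the DP: it records where each 'f' sits among the non-'f' characters and then
-- fills the table layer by layer over f-indices instead of A's per-character vector sweep;
-- objective: alternative (same asymptotic cost, different traversal).

def pvMOD : Int := 1000000007

-- ===== PORT A =====
-- inner loop "for j in range(1, len(dp)): dp[j] = (dp[j] + dp[j-1]) % MOD";
-- `prev` is the already-updated dp[j-1]
def pvPrefA (prev : Int) : List Int → List Int
  | [] => []
  | x :: xs =>
      let y := PySem.Int.mod (x + prev) pvMOD
      y :: pvPrefA y xs

def pvStepA (dp : List Int) (c : Char) : List Int :=
  if c = 'f' then dp ++ [0]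
  else
    match dp with
    | [] => []
    | h :: t => h :: pvPrefA h t

def solve (a : String) : Int :=
  let dp := a.toList.foldl pvStepA [1]
  -- dp[-1]; dp is provably nonempty, the default is unreachable
  (PySem.List.pyGet? dp (-1)).getD 0

-- ===== PORT B =====
-- first pass: for each 'f', the number of non-'f' characters before it
def pvStarts (p : List Nat × Nat) (c : Char) : List Nat × Nat :=
  if c = 'f' then (p.1 ++ [p.2], p.2) else (p.1, p.2 + 1)

-- inner loop "for s in range(b, m): run = (run + cur[s]) % MOD; nxt[s] = run"
def pvScan (run : Int) : List Int → List Int × Int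
  | [] => ([], run)
  | x :: xs =>
      let r := PySem.Int.mod (run + x) pvMOD
      let (ys, rf) := pvScan r xs
      (r :: ys, rf)

-- one outer iteration: nxt keeps zeros below b (b ≤ m in every actual call)
def pvLayer (cur : List Int) (b : Nat) : List Int × Int :=
  let p := pvScan 0 (cur.drop b)
  (List.replicate b 0 ++ p.1, p.2)

def solve_alt (a : String) : Int :=
  let st := a.toList.foldl pvStarts ([], 0)
  let res := st.1.foldl (fun (p : List Int × Int) b => pvLayer p.1 b)
      (List.replicate st.2 (1:Int), 1)
  res.2

-- ===== PRECONDITION & SPEC =====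
def Spec_solve (a : String) (out : Int) : Prop := out = solve_alt a
instance (a : String) (out : Int) : Decidable (Spec_solve a out) := by unfold Spec_solve; infer_instance

-- ===== CLAIM (what is proved, stated in full; the proofs are below) =====
def Claim_equal_solve : Prop := ∀ (a : String), Dom_solve a → Spec_solve a (solve a)

-- ===== LEMMAS AND PROOFS =====

-- the common mathematical table: pvAval bs j t = dp[j] after t non-'f' characters,
-- where bs lists for each 'f' how many non-'f' characters precede it
def pvAcc (prev : Nat → Int) (b : Nat) : Nat → Int
  | 0 => 0
  | t+1 => if b ≤ t then PySem.Int.mod (pvAcc prev b t + prev (t+1)) pvMOD else 0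

def pvAval (bs : List Nat) : Nat → Nat → Int
  | 0, _ => 1
  | j+1, t => pvAcc (pvAval bs j) (bs.getD j 0) t

theorem pvAcc_eq_zero (prev : Nat → Int) (b t : Nat) (h : t ≤ b) : pvAcc prev b t = 0 := by
  cases t with
  | zero => rfl
  | succ s => simp [pvAcc, Nat.not_le.mpr (Nat.lt_of_succ_le h)]

theorem pvAcc_congr (p1 p2 : Nat → Int) (b : Nat) (h : ∀ s, p1 s = p2 s) :
    ∀ t, pvAcc p1 b t = pvAcc p2 b t := by
  intro t
  induction t with
  | zero => rfl
  | succ s ih => simp [pvAcc, ih, h]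

theorem pvAval_append (bs bs' : List Nat) :
    ∀ j, j ≤ bs.length → ∀ t, pvAval (bs ++ bs') j t = pvAval bs j t := by
  intro j
  induction j with
  | zero => intro _ t; rfl
  | succ i ih =>
      intro hle t
      have hi : i < bs.length := hle
      have hg : (bs ++ bs').getD i 0 = bs.getD i 0 := by
        simp [List.getD, List.getElem?_append_left hi]
      simp only [pvAval, hg]
      exact pvAcc_congr _ _ _ (fun s => ih (Nat.le_of_lt hi) s) t

-- A's inner loop advances every layer one non-'f' character
theorem pvPrefA_map (bs : List Nat) (m : Nat) (hb : ∀ j, bs.getD j 0 ≤ m) :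
    ∀ (n i : Nat),
      pvPrefA (pvAval bs i (m+1)) ((List.range n).map (fun d => pvAval bs (i+1+d) m)) =
      (List.range n).map (fun d => pvAval bs (i+1+d) (m+1)) := by
  intro n
  induction n with
  | zero => intro i; rfl
  | succ k ih =>
      intro i
      rw [List.range_succ_eq_map]
      simp only [List.map_cons, List.map_map]
      have hstep : pvAval bs (i+1) (m+1) =
          PySem.Int.mod (pvAval bs (i+1) m + pvAval bs i (m+1)) pvMOD := by
        show pvAcc (pvAval bs i) (bs.getD i 0) (m+1) = _
        rw [pvAcc, if_pos (hb i)]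
        rfl
      have hcomp1 : ((fun d => pvAval bs (i+1+d) m) ∘ Nat.succ) =
          (fun d => pvAval bs (i+1+1+d) m) := by
        funext d; simp [Function.comp]; ring_nf
      have hcomp2 : ((fun d => pvAval bs (i+1+d) (m+1)) ∘ Nat.succ) =
          (fun d => pvAval bs (i+1+1+d) (m+1)) := by
        funext d; simp [Function.comp]; ring_nf
      show pvPrefA (pvAval bs i (m+1))
          (pvAval bs (i+1+0) m :: ((List.range k).map ((fun d => pvAval bs (i+1+d) m) ∘ Nat.succ)))
          = pvAval bs (i+1+0) (m+1) :: (List.range k).map ((fun d => pvAval bs (i+1+d) (m+1)) ∘ Nat.succ)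
      rw [hcomp1, hcomp2]
      simp only [Nat.add_zero]
      show (PySem.Int.mod (pvAval bs (i+1) m + pvAval bs i (m+1)) pvMOD) ::
            pvPrefA (PySem.Int.mod (pvAval bs (i+1) m + pvAval bs i (m+1)) pvMOD)
              ((List.range k).map (fun d => pvAval bs (i+2+d) m))
          = pvAval bs (i+1) (m+1) :: (List.range k).map (fun d => pvAval bs (i+2+d) (m+1))
      rw [← hstep]
      have := ih (i+1)
      have harg : ∀ (t : Nat) (g : Nat → Nat → Int), (fun d => g (i+1+1+d) t) = (fun d => g (i+2+d) t) := by
        intro t g; funext d; ring_nf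
      rw [harg m (pvAval bs), harg (m+1) (pvAval bs)] at this
      rw [this]

-- MAIN, A side: the per-character fold computes the columns of the table
theorem pvMainA (l : List Char) :
    (∀ b ∈ (l.foldl pvStarts ([], 0)).1, b ≤ (l.foldl pvStarts ([], 0)).2) ∧
    l.foldl pvStepA [1] =
      (List.range ((l.foldl pvStarts ([], 0)).1.length + 1)).map
        (fun j => pvAval (l.foldl pvStarts ([], 0)).1 j (l.foldl pvStarts ([], 0)).2) := by
  induction l using List.reverseRecOn with
  | nil => exact ⟨by simp, by simp [pvAval]⟩
  | append_singleton l c ih =>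
      obtain ⟨hbnd, hdp⟩ := ih
      set st := l.foldl pvStarts ([], 0) with hst
      set bs := st.1 with hbs
      set m := st.2 with hm
      set n := bs.length with hn
      rw [List.foldl_append, List.foldl_append]
      simp only [List.foldl_cons, List.foldl_nil]
      by_cases hc : c = 'f'
      · have hstarts : pvStarts st c = (bs ++ [m], m) := by
          unfold pvStarts; rw [if_pos hc]
        have hstep : pvStepA (l.foldl pvStepA [1]) c = (l.foldl pvStepA [1]) ++ [0] := by
          unfold pvStepA; rw [if_pos hc]
        rw [hstarts, hstep, hdp]
        constructor
        · intro b hb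
          simp only [List.mem_append, List.mem_singleton] at hb
          rcases hb with h | h
          · exact hbnd b h
          · omega
        · simp only [List.length_append, List.length_singleton]
          rw [show n + 1 + 1 = (n + 1) + 1 from rfl, List.range_succ (n := n + 1),
            List.map_append]
          congr 1
          · refine List.map_congr_left ?_
            intro j hj
            have hjn : j ≤ n := by
              have := List.mem_range.mp hj; omega
            exact (pvAval_append bs [m] j hjn m).symm
          · simp only [List.map_cons, List.map_nil]
            have hg : (bs ++ [m]).getD n 0 = m := by
              rw [hn]; simp [List.getD]
            have hz : pvAval (bs ++ [m]) (n+1) m = 0 := by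
              show pvAcc (pvAval (bs ++ [m]) n) ((bs ++ [m]).getD n 0) m = 0
              rw [hg]
              exact pvAcc_eq_zero _ m m (le_refl m)
            rw [hz]
      · have hstarts : pvStarts st c = (bs, m + 1) := by
          unfold pvStarts; rw [if_neg hc]
        have hstep1 : ∀ dp, pvStepA dp c = match dp with
            | [] => [] | h :: t => h :: pvPrefA h t := by
          intro dp; unfold pvStepA; rw [if_neg hc]
        rw [hstarts, hdp]
        refine ⟨fun b hb => Nat.le_succ_of_le (hbnd b hb), ?_⟩
        have hball : ∀ j, bs.getD j 0 ≤ m := by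
          intro j
          by_cases hj : j < bs.length
          · have : bs.getD j 0 ∈ bs := by
              rw [List.getD_eq_getElem _ _ hj]; exact List.getElem_mem hj
            exact hbnd _ this
          · rw [List.getD_eq_default _ _ (Nat.le_of_not_lt hj)]; exact Nat.zero_le m
        rw [List.range_succ_eq_map, List.map_cons, List.map_cons, List.map_map, List.map_map]
        rw [hstep1]
        have h0 : pvAval bs 0 m = pvAval bs 0 (m+1) := rfl
        have hcomp : ∀ t : Nat, ((fun j => pvAval bs j t) ∘ Nat.succ) = (fun d => pvAval bs (0+1+d) t) := by
          intro t; funext d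
          show pvAval bs (d+1) t = pvAval bs (0+1+d) t
          congr 1; omega
        rw [hcomp, hcomp]
        show pvAval bs 0 m :: pvPrefA (pvAval bs 0 m) ((List.range n).map fun d => pvAval bs (0+1+d) m)
            = pvAval bs 0 (m+1) :: ((List.range n).map fun d => pvAval bs (0+1+d) (m+1))
        rw [h0, pvPrefA_map bs m hball n 0]

-- B's inner loop over one layer
theorem pvScan_range' (prev : Nat → Int) (b : Nat) :
    ∀ (L off : Nat),
      pvScan (pvAcc prev b (b+off)) ((List.range' (b+off) L).map (fun s => prev (s+1))) =
      ((List.range' (b+off) L).map (fun s => pvAcc prev b (s+1)), pvAcc prev b (b+off+L)) := by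
  intro L
  induction L with
  | zero => intro off; simp [pvScan]
  | succ K ih =>
      intro off
      rw [List.range'_succ, List.map_cons, List.map_cons]
      have hstep : PySem.Int.mod (pvAcc prev b (b+off) + prev (b+off+1)) pvMOD =
          pvAcc prev b (b+off+1) := by
        have : b ≤ b + off := Nat.le_add_right b off
        simp [pvAcc, this]
      show (let r := PySem.Int.mod (pvAcc prev b (b+off) + prev (b+off+1)) pvMOD
            let p := pvScan r ((List.range' (b+off+1) K).map (fun s => prev (s+1)))
            (r :: p.1, p.2)) = _
      simp only [hstep]
      have := ih (off+1)
      rw [show b + (off+1) = b + off + 1 from by ring] at this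
      rw [this, show b+off+(K+1) = b+off+1+K from by omega]

theorem pvLayer_map (prev : Nat → Int) (b M : Nat) (hbM : b ≤ M) :
    pvLayer ((List.range M).map (fun s => prev (s+1))) b =
      ((List.range M).map (fun s => pvAcc prev b (s+1)), pvAcc prev b M) := by
  have hdrop : ((List.range M).map (fun s => prev (s+1))).drop b =
      (List.range' b (M - b)).map (fun s => prev (s+1)) := by
    rw [← List.map_drop, List.range_eq_range', List.drop_range']
    simp
  have hscan := pvScan_range' prev b (M - b) 0
  rw [Nat.add_zero, pvAcc_eq_zero prev b b (le_refl b)] at hscan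
  have hbM' : b + (M - b) = M := by omega
  rw [hbM'] at hscan
  unfold pvLayer
  rw [hdrop, hscan]
  simp only []
  congr 1
  have hsplit : List.range M = List.range b ++ List.range' b (M - b) := by
    rw [← hbM', List.range_eq_range', List.range_eq_range']
    have := @List.range'_append 0 b (M - b) 1
    simpa using this.symm
  rw [hsplit, List.map_append]
  congr 1
  refine (List.eq_replicate_iff.mpr ⟨by simp, ?_⟩).symm
  intro x hx
  simp only [List.mem_map, List.mem_range] at hx
  obtain ⟨s, hs, hx⟩ := hx
  rw [← hx]
  exact pvAcc_eq_zero prev b (s+1) (Nat.succ_le_of_lt hs)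

-- MAIN, B side: the layer fold walks the table row by row
theorem pvMainB (bs : List Nat) (M : Nat) (hbnd : ∀ b ∈ bs, b ≤ M) :
    ∀ (bs2 : List Nat) (j : Nat), bs.drop j = bs2 → j ≤ bs.length →
      bs2.foldl (fun (p : List Int × Int) b => pvLayer p.1 b)
        ((List.range M).map (fun s => pvAval bs j (s+1)), pvAval bs j M) =
      ((List.range M).map (fun s => pvAval bs bs.length (s+1)), pvAval bs bs.length M) := by
  intro bs2
  induction bs2 with
  | nil =>
      intro j hdrop hle
      have : bs.length ≤ j := by
        have := List.drop_eq_nil_iff.mp hdrop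
        omega
      have hj : j = bs.length := le_antisymm hle this
      rw [hj]
      rfl
  | cons b bs2' ih =>
      intro j hdrop hle
      have hjlt : j < bs.length := by
        by_contra h
        have hnil : bs.drop j = [] := List.drop_eq_nil_iff.mpr (by omega)
        rw [hdrop] at hnil
        simp at hnil
      have hget : bs[j]?.getD 0 = b := by
        have h0 := @List.getElem?_drop _ bs j 0
        rw [hdrop] at h0
        simp only [List.getElem?_cons_zero, Nat.add_zero] at h0
        rw [← h0]
        rfl
      have hdrop' : bs.drop (j+1) = bs2' := by
        have : bs.drop (j+1) = (bs.drop j).tail := by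
          rw [← List.tail_drop]
        rw [this, hdrop]
        rfl
      have hmem : b ∈ bs := List.mem_of_mem_drop
        (show b ∈ bs.drop j by rw [hdrop]; exact List.mem_cons_self)
      have hbM : b ≤ M := hbnd b hmem
      rw [List.foldl_cons]
      have hlayer := pvLayer_map (pvAval bs j) b M hbM
      have hnext1 : (List.range M).map (fun s => pvAcc (pvAval bs j) b (s+1)) =
          (List.range M).map (fun s => pvAval bs (j+1) (s+1)) := by
        refine List.map_congr_left ?_
        intro s _
        simp only [pvAval, List.getD]
        rw [hget]
      have hnext2 : pvAcc (pvAval bs j) b M = pvAval bs (j+1) M := by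
        simp only [pvAval, List.getD]
        rw [hget]
      rw [show (pvLayer ((List.range M).map (fun s => pvAval bs j (s+1)), pvAval bs j M).1 b) = pvLayer ((List.range M).map (fun s => pvAval bs j (s+1))) b from rfl]
      rw [hlayer, hnext1, hnext2]
      exact ih (j+1) hdrop' hjlt

-- ===== VERDICT (by name: the statement is the Claim_ definition above) =====
theorem solve_spec : Claim_equal_solve := by
  intro a _
  unfold Spec_solve solve solve_alt
  obtain ⟨hbnd, hdp⟩ := pvMainA a.toList
  set st := a.toList.foldl pvStarts ([], 0) with hst
  set bs := st.1 with hbs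
  set M := st.2 with hM
  set n := bs.length with hn
  -- A's returned value
  rw [hdp]
  have hlast : (List.range (n+1)).map (fun j => pvAval bs j M)
      = (List.range n).map (fun j => pvAval bs j M) ++ [pvAval bs n M] := by
    rw [List.range_succ, List.map_append]; rfl
  rw [hlast]
  show (PySem.List.pyGet? ((List.range n).map (fun j => pvAval bs j M) ++ [pvAval bs n M]) (-1)).getD 0
      = (List.foldl (fun (p : List Int × Int) b => pvLayer p.1 b) (List.replicate M (1:Int), 1) bs).2
  rw [PySem.List.pyGet?_neg_one_append_singleton]
  -- B's returned value
  have hinit1 : List.replicate M (1:Int) = (List.range M).map (fun s => pvAval bs 0 (s+1)) := by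
    refine (List.eq_replicate_iff.mpr ⟨by simp, ?_⟩).symm
    intro x hx
    simp only [List.mem_map] at hx
    obtain ⟨s, _, hx⟩ := hx
    rw [← hx]; rfl
  have hinit2 : (1:Int) = pvAval bs 0 M := rfl
  have hfold := pvMainB bs M hbnd bs 0 (by rfl) (Nat.zero_le _)
  rw [hinit1, hinit2, hfold]
  rfl
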